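-- pv_equiv track=rewrite | github.com/Andrew-Fryer/CMPE204_Final_Project | deadlock.py | generate_lists_of_resources
-- ===== SOURCE A (Python) =====
-- num_resources = 2
--
-- def generate_lists_of_resources(length, j):
--   if length == 1:
--     return [[j]]
--   prev_list = generate_lists_of_resources(length - 1, j)
--   res = []
--   for l in prev_list:
--     for r in range(num_resources):
--       res.append(l + [r])
--   return res
-- ===== SOURCE B (Python) =====
-- num_resources = 2
--
-- def generate_lists_of_resources(length, j):
--   res = [[j]]
--   for _ in range(length - 1):
--     res = [l + [r] for l in res for r in range(num_resources)]
--   return res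
-- ===== Notes on version B (the rewrite author's own statement) =====
-- stated objective: simpler
-- what changed: Replaces A's recursion on length (with nested append loops into an explicit accumulator) by a non-recursive loop repeating length-1 times a flat-map comprehension over the current result.
import Mathlib
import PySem

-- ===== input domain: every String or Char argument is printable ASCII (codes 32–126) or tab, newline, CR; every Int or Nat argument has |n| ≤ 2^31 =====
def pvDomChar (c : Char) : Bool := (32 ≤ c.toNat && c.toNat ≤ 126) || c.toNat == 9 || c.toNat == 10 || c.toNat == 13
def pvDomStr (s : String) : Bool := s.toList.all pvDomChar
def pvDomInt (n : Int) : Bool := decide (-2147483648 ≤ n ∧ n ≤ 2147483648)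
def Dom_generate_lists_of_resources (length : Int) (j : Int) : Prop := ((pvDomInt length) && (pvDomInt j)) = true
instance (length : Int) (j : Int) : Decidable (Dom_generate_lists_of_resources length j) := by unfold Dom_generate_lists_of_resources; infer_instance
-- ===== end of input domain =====

-- B replaces A's recursion on length by an iterative loop of flat-map comprehensions (objective: simpler).


-- ===== PORT A =====
-- A's recursion on `length`, transcribed as structural recursion on the fuel (length - 1).toNat
-- (Pre_ restricts to length ≥ 1, where this is exactly A's recursion depth).
def genA : Nat → Int → List (List Int)
  | 0, j => [[j]]
  | n+1, j =>
    -- res = []; for l in prev_list: for r in range(num_resources): res.append(l + [r])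
    (genA n j).foldl
      (fun res l => (PySem.List.pyRange 0 2 1).foldl (fun res r => res ++ [l ++ [r]]) res) []

def generate_lists_of_resources (length : Int) (j : Int) : List (List Int) :=
  genA (length - 1).toNat j

-- ===== PORT B =====
def generate_lists_of_resources_alt (length : Int) (j : Int) : List (List Int) :=
  -- res = [[j]]; for _ in range(length - 1): res = [l + [r] for l in res for r in range(num_resources)]
  (PySem.List.pyRange 0 (length - 1) 1).foldl
    (fun res _ => res.flatMap (fun l => (PySem.List.pyRange 0 2 1).map (fun r => l ++ [r])))
    [[j]]

-- ===== PRECONDITION & SPEC =====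
-- Pre_ excludes length < 1, where A recurses without bound (RecursionError).
def Pre_generate_lists_of_resources (length : Int) (j : Int) : Prop := 1 ≤ length
instance (length : Int) (j : Int) : Decidable (Pre_generate_lists_of_resources length j) := by
  unfold Pre_generate_lists_of_resources; infer_instance

def pvWitness_generate_lists_of_resources : Int × Int := (3, 5)

def Spec_generate_lists_of_resources (length : Int) (j : Int) (out : List (List Int)) : Prop := out = generate_lists_of_resources_alt length j
instance (length : Int) (j : Int) (out : List (List Int)) : Decidable (Spec_generate_lists_of_resources length j out) := by unfold Spec_generate_lists_of_resources; infer_instance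

-- ===== CLAIM (what is proved, stated in full; the proofs are below) =====
def Claim_equal_generate_lists_of_resources : Prop := ∀ (length : Int) (j : Int), Dom_generate_lists_of_resources length j → Pre_generate_lists_of_resources length j → Spec_generate_lists_of_resources length j (generate_lists_of_resources length j)

-- ===== LEMMAS AND PROOFS =====

def pvStep (res : List (List Int)) : List (List Int) :=
  res.flatMap (fun l => (PySem.List.pyRange 0 2 1).map (fun r => l ++ [r]))

lemma pvStepA_eq (prev acc : List (List Int)) :
    prev.foldl
      (fun res l => (PySem.List.pyRange 0 2 1).foldl (fun res r => res ++ [l ++ [r]]) res) acc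
    = acc ++ pvStep prev := by
  induction prev generalizing acc with
  | nil => simp [pvStep]
  | cons h t ih =>
    simp only [List.foldl_cons, ih, pvStep]
    have : PySem.List.pyRange 0 2 1 = [0, 1] := by decide
    simp [this]

lemma pvGenA_iterate (n : Nat) (j : Int) : genA n j = pvStep^[n] [[j]] := by
  induction n with
  | zero => simp [genA]
  | succ n ih =>
    rw [genA, ih, pvStepA_eq, Function.iterate_succ_apply']
    simp

lemma pvFoldl_const {α β : Type} (xs : List α) (f : β → β) (acc : β) :
    xs.foldl (fun res _ => f res) acc = f^[xs.length] acc := by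
  induction xs generalizing acc with
  | nil => simp
  | cons h t ih => simp [List.foldl_cons, ih, Function.iterate_succ_apply]

-- ===== VERDICT (by name: the statement is the Claim_ definition above) =====
theorem generate_lists_of_resources_spec : Claim_equal_generate_lists_of_resources := by
  intro length j _ _
  unfold Spec_generate_lists_of_resources generate_lists_of_resources generate_lists_of_resources_alt
  rw [pvGenA_iterate, pvFoldl_const]
  rw [PySem.List.length_pyRange_one]
  norm_num
  rfl
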